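-- pv_equiv track=rewrite | github.com/sifontesopsu/v1-picking | app_ads_actualizada.py | _find_sheet
-- ===== SOURCE A (Python) =====
-- def _find_sheet(sheet_names, wanted):
--     for name in sheet_names:
--         if name.lower().strip() == wanted.lower().strip():
--             return name
--     for name in sheet_names:
--         if wanted.lower().strip() in name.lower().strip():
--             return name
--     return None
-- ===== SOURCE B (Python) =====
-- def _find_sheet(sheet_names, wanted):
--     w = wanted.lower().strip()
--     fallback = None
--     for name in sheet_names:
--         n = name.lower().strip()
--         if n == w:
--             return name
--         if fallback is None and w in n:
--             fallback = name
--     return fallback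
-- ===== Notes on version B (the rewrite author's own statement) =====
-- stated objective: faster
-- what changed: Replaces A's two full scans (exact pass, then substring pass) with one fused pass that normalizes wanted once, returns immediately on an exact match and records the first substring candidate in a fallback variable.
import Mathlib
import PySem

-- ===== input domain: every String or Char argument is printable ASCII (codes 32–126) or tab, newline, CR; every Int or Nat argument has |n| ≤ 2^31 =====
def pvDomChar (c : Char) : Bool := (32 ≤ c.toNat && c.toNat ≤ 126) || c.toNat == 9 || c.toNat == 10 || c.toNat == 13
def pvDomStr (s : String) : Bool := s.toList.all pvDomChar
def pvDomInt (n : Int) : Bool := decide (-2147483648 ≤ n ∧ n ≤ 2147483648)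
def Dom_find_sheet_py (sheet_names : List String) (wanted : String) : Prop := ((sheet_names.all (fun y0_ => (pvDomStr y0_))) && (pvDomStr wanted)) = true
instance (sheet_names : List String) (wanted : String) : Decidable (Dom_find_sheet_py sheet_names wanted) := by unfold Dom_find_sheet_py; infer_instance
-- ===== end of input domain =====

-- B fuses A's two scans (exact pass, then substring pass) into one pass that
-- normalizes `wanted` once and keeps the first substring candidate as a fallback.


-- ===== PORT A =====
-- first loop: return the first name whose normalization equals wanted's
def findSheetLoop1 (sheet_names : List String) (wanted : String) : Option String :=
  match sheet_names with
  | [] => none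
  | name :: rest =>
    if PySem.Str.strip (PySem.Str.lower name) == PySem.Str.strip (PySem.Str.lower wanted) then
      some name
    else findSheetLoop1 rest wanted

-- second loop: return the first name whose normalization contains wanted's
def findSheetLoop2 (sheet_names : List String) (wanted : String) : Option String :=
  match sheet_names with
  | [] => none
  | name :: rest =>
    if PySem.Str.isIn (PySem.Str.strip (PySem.Str.lower wanted)) (PySem.Str.strip (PySem.Str.lower name)) then
      some name
    else findSheetLoop2 rest wanted

def find_sheet_py (sheet_names : List String) (wanted : String) : Option String :=
  match findSheetLoop1 sheet_names wanted with
  | some name => some name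
  | none => findSheetLoop2 sheet_names wanted

-- ===== PORT B =====
-- single fused pass: exact match returns at once; first substring hit is kept as fallback
def findSheetAltLoop (w : String) (fallback : Option String) (sheet_names : List String) : Option String :=
  match sheet_names with
  | [] => fallback
  | name :: rest =>
    let n := PySem.Str.strip (PySem.Str.lower name)
    if n == w then some name
    else
      findSheetAltLoop w
        (if fallback.isNone && PySem.Str.isIn w n then some name else fallback) rest

def find_sheet_py_alt (sheet_names : List String) (wanted : String) : Option String :=
  findSheetAltLoop (PySem.Str.strip (PySem.Str.lower wanted)) none sheet_names

-- ===== PRECONDITION & SPEC =====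
def Spec_find_sheet_py (sheet_names : List String) (wanted : String) (out : Option String) : Prop := out = find_sheet_py_alt sheet_names wanted
instance (sheet_names : List String) (wanted : String) (out : Option String) : Decidable (Spec_find_sheet_py sheet_names wanted out) := by unfold Spec_find_sheet_py; infer_instance

-- ===== CLAIM (what is proved, stated in full; the proofs are below) =====
def Claim_equal_find_sheet_py : Prop := ∀ (sheet_names : List String) (wanted : String), Dom_find_sheet_py sheet_names wanted → Spec_find_sheet_py sheet_names wanted (find_sheet_py sheet_names wanted)

-- ===== LEMMAS AND PROOFS =====
theorem findSheetAltLoop_eq (wanted : String) :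
    ∀ (l : List String) (fb : Option String),
      findSheetAltLoop (PySem.Str.strip (PySem.Str.lower wanted)) fb l =
        match findSheetLoop1 l wanted with
        | some name => some name
        | none => match fb with
                  | some x => some x
                  | none => findSheetLoop2 l wanted := by
  intro l
  induction l with
  | nil =>
    intro fb
    cases fb <;> rfl
  | cons name rest ih =>
    intro fb
    rw [show findSheetAltLoop (PySem.Str.strip (PySem.Str.lower wanted)) fb (name :: rest) =
        (if (PySem.Str.strip (PySem.Str.lower name) == PySem.Str.strip (PySem.Str.lower wanted)) = true
         then some name
         else findSheetAltLoop (PySem.Str.strip (PySem.Str.lower wanted))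
            (if (fb.isNone && PySem.Str.isIn (PySem.Str.strip (PySem.Str.lower wanted))
                  (PySem.Str.strip (PySem.Str.lower name))) = true
             then some name else fb) rest) from rfl,
       show findSheetLoop1 (name :: rest) wanted =
        (if (PySem.Str.strip (PySem.Str.lower name) == PySem.Str.strip (PySem.Str.lower wanted)) = true
         then some name else findSheetLoop1 rest wanted) from rfl,
       show findSheetLoop2 (name :: rest) wanted =
        (if PySem.Str.isIn (PySem.Str.strip (PySem.Str.lower wanted))
              (PySem.Str.strip (PySem.Str.lower name)) = true
         then some name else findSheetLoop2 rest wanted) from rfl]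
    by_cases h1 : (PySem.Str.strip (PySem.Str.lower name)
        == PySem.Str.strip (PySem.Str.lower wanted)) = true
    · rw [if_pos h1, if_pos h1]
    · rw [if_neg h1, if_neg h1, ih]
      cases fb with
      | some x => rfl
      | none =>
        simp only [Option.isNone_none, Bool.true_and]
        by_cases h2 : PySem.Str.isIn (PySem.Str.strip (PySem.Str.lower wanted))
            (PySem.Str.strip (PySem.Str.lower name)) = true
        · rw [if_pos h2, if_pos h2]
        · rw [if_neg h2, if_neg h2]

-- ===== VERDICT (by name: the statement is the Claim_ definition above) =====
theorem find_sheet_py_spec : Claim_equal_find_sheet_py := by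
  intro sheet_names wanted _
  unfold Spec_find_sheet_py find_sheet_py find_sheet_py_alt
  rw [findSheetAltLoop_eq wanted sheet_names none]
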